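-- pv_equiv track=rewrite | github.com/deekshithamv9/SQL-Query-Generator | frontend/app.py | validate_sql_syntax
-- ===== SOURCE A (Python) =====
-- def validate_sql_syntax(sql_text):
--     """Basic SQL syntax validation"""
--     sql_upper = sql_text.upper().strip()
--
--     # Check for common SQL keywords
--     valid_starts = ['SELECT', 'INSERT', 'UPDATE', 'DELETE', 'CREATE', 'DROP', 'ALTER', 'SHOW', 'DESCRIBE', 'EXPLAIN']
--
--     if not any(sql_upper.startswith(keyword) for keyword in valid_starts):
--         return False, "Query doesn't start with a valid SQL keyword"
--
--     # Check for balanced parentheses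
--     if sql_text.count('(') != sql_text.count(')'):
--         return False, "Unbalanced parentheses in query"
--
--     # Check for balanced quotes
--     single_quotes = sql_text.count("'") - sql_text.count("\\'")
--     if single_quotes % 2 != 0:
--         return False, "Unbalanced single quotes in query"
--
--     return True, "Query syntax appears valid"
-- ===== SOURCE B (Python) =====
-- def validate_sql_syntax(sql_text):
--     """Basic SQL syntax validation (tokenizer version: maximal-munch scan with a
--     signed paren-depth counter and a quote-parity flag)."""
--     sql_upper = sql_text.upper().strip()
--
--     valid_starts = ['SELECT', 'INSERT', 'UPDATE', 'DELETE', 'CREATE', 'DROP', 'ALTER', 'SHOW', 'DESCRIBE', 'EXPLAIN']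
--
--     if not any(sql_upper.startswith(keyword) for keyword in valid_starts):
--         return False, "Query doesn't start with a valid SQL keyword"
--
--     depth = 0            # net parenthesis depth: count('(') - count(')')
--     quotes_even = True   # parity of quotes not consumed as part of a "\\'" token
--     i = 0
--     n = len(sql_text)
--     while i < n:
--         if sql_text.startswith("\\'", i):
--             # escaped-quote token: consumes the quote, leaves parity unchanged
--             i += 2
--             continue
--         ch = sql_text[i]
--         if ch == '(':
--             depth += 1
--         elif ch == ')':
--             depth -= 1
--         elif ch == "'":
--             quotes_even = not quotes_even
--         i += 1
--
--     if depth != 0: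
--         return False, "Unbalanced parentheses in query"
--
--     if not quotes_even:
--         return False, "Unbalanced single quotes in query"
--
--     return True, "Query syntax appears valid"
-- ===== Notes on version B (the rewrite author's own statement) =====
-- stated objective: alternative
-- what changed: A's three independent str.count scans are replaced by a single maximal-munch tokenizer pass that consumes \' as one two-character token and maintains only a signed parenthesis-depth counter and a quote-parity flag (no counts are ever materialised); the keyword-prefix check stays.
import Mathlib
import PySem

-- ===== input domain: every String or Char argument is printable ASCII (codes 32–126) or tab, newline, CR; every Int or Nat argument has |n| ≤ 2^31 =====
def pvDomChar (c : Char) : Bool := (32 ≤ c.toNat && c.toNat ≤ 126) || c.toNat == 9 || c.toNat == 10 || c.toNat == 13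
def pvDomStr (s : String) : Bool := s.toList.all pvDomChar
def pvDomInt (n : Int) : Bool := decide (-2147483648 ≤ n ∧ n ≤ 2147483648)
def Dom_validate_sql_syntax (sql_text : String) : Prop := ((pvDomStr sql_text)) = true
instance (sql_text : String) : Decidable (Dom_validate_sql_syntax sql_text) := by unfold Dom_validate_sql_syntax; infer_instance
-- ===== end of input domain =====

-- B replaces A's three .count scans by one maximal-munch tokenizer pass ("\\'" consumed as a
-- two-char token) maintaining a signed paren-depth counter and a quote-parity flag (alternative).

-- ===== PORT A =====
def validate_sql_syntax (sql_text : String) : Bool × String :=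
  let sql_upper := PySem.Str.strip (PySem.Str.upper sql_text)
  let valid_starts : List String :=
    ["SELECT", "INSERT", "UPDATE", "DELETE", "CREATE", "DROP", "ALTER", "SHOW", "DESCRIBE", "EXPLAIN"]
  if !(valid_starts.any (fun keyword => PySem.Str.startswith sql_upper keyword)) then
    (false, "Query doesn't start with a valid SQL keyword")
  else if PySem.Str.count sql_text "(" ≠ PySem.Str.count sql_text ")" then
    (false, "Unbalanced parentheses in query")
  else
    let single_quotes : Int :=
      (PySem.Str.count sql_text "'" : Int) - (PySem.Str.count sql_text "\\'" : Int)
    if PySem.Int.mod single_quotes 2 ≠ 0 then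
      (false, "Unbalanced single quotes in query")
    else
      (true, "Query syntax appears valid")

-- ===== PORT B =====
-- one single-character step of Source B's loop body (the non-token branch)
def pvStepB (d : Int) (qe : Bool) (ch : Char) : Int × Bool :=
  if ch = '(' then (d + 1, qe)
  else if ch = ')' then (d - 1, qe)
  else if ch = '\'' then (d, !qe)
  else (d, qe)

-- Source B's while-loop: maximal-munch scan; a "\\'" prefix is consumed as one two-char token
def pvScanB : List Char → Int → Bool → Int × Bool
  | [], d, qe => (d, qe)
  | [x], d, qe => pvStepB d qe x
  | x :: y :: t, d, qe =>
    if x = '\\' ∧ y = '\'' then pvScanB t d qe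
    else
      let (d', qe') := pvStepB d qe x
      pvScanB (y :: t) d' qe'

def validate_sql_syntax_alt (sql_text : String) : Bool × String :=
  let sql_upper := PySem.Str.strip (PySem.Str.upper sql_text)
  let valid_starts : List String :=
    ["SELECT", "INSERT", "UPDATE", "DELETE", "CREATE", "DROP", "ALTER", "SHOW", "DESCRIBE", "EXPLAIN"]
  if !(valid_starts.any (fun keyword => PySem.Str.startswith sql_upper keyword)) then
    (false, "Query doesn't start with a valid SQL keyword")
  else
    let (depth, quotes_even) := pvScanB sql_text.toList 0 true
    if depth ≠ 0 then
      (false, "Unbalanced parentheses in query")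
    else if !quotes_even then
      (false, "Unbalanced single quotes in query")
    else
      (true, "Query syntax appears valid")

-- ===== PRECONDITION & SPEC =====
def Spec_validate_sql_syntax (sql_text : String) (out : Bool × String) : Prop := out = validate_sql_syntax_alt sql_text
instance (sql_text : String) (out : Bool × String) : Decidable (Spec_validate_sql_syntax sql_text out) := by unfold Spec_validate_sql_syntax; infer_instance

-- ===== CLAIM (what is proved, stated in full; the proofs are below) =====
def Claim_equal_validate_sql_syntax : Prop := ∀ (sql_text : String), Dom_validate_sql_syntax sql_text → Spec_validate_sql_syntax sql_text (validate_sql_syntax sql_text)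

-- ===== LEMMAS AND PROOFS =====

-- number of non-overlapping occurrences of "\\'" (what A's third .count computes)
def escPairs : List Char → Nat
  | x :: y :: t => if x = '\\' ∧ y = '\'' then 1 + escPairs t else escPairs (y :: t)
  | _ => 0

-- quotes NOT consumed as the second char of a "\\'" token (what B's parity flag counts)
def plainQ : List Char → Nat
  | [] => 0
  | [x] => if x = '\'' then 1 else 0
  | x :: y :: t =>
    if x = '\\' ∧ y = '\'' then plainQ t
    else (if x = '\'' then 1 else 0) + plainQ (y :: t)

theorem count_quote_split : ∀ (l : List Char),
    l.count '\'' = plainQ l + escPairs l := by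
  intro l
  induction l using plainQ.induct with
  | case1 => simp [plainQ, escPairs]
  | case2 => simp [plainQ, escPairs]
  | case3 x hx => simp [plainQ, escPairs, List.count_cons, Ne.symm hx, hx]
  | case4 x y t h ih =>
    obtain ⟨hx, hy⟩ := h
    subst hx; subst hy
    rw [show plainQ ('\\' :: '\'' :: t) = plainQ t from by simp [plainQ]]
    rw [show escPairs ('\\' :: '\'' :: t) = 1 + escPairs t from by simp [escPairs]]
    simp [List.count_cons, ih]
    omega
  | case5 x y t h ih =>
    rw [show plainQ (x :: y :: t) = (if x = '\'' then 1 else 0) + plainQ (y :: t) from by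
      simp [plainQ, h]]
    rw [show escPairs (x :: y :: t) = escPairs (y :: t) from by simp [escPairs, h]]
    rw [List.count_cons, ih]
    by_cases hx : x = '\'' <;> simp [hx] <;> omega

theorem scanB_spec : ∀ (l : List Char) (d : Int) (qe : Bool),
    pvScanB l d qe =
      (d + (l.count '(' : Int) - (l.count ')' : Int),
       qe ^^ decide (plainQ l % 2 = 1)) := by
  intro l d qe
  induction l, d, qe using pvScanB.induct with
  | case1 d qe => simp [pvScanB, plainQ]
  | case2 x d qe =>
    rw [show pvScanB [x] d qe = pvStepB d qe x from rfl]
    unfold pvStepB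
    by_cases h1 : x = '('
    · subst h1; simp [plainQ, List.count_cons]
    · by_cases h2 : x = ')'
      · subst h2; simp [plainQ, List.count_cons]
      · by_cases h3 : x = '\''
        · subst h3
          simp [plainQ, h1, h2]
        · simp [plainQ, h1, h2, h3]
  | case3 x y t d qe h ih =>
    obtain ⟨hx, hy⟩ := h
    subst hx; subst hy
    rw [show pvScanB ('\\' :: '\'' :: t) d qe = pvScanB t d qe from by simp [pvScanB]]
    rw [ih]
    rw [show plainQ ('\\' :: '\'' :: t) = plainQ t from by simp [plainQ]]
    simp [List.count_cons]
  | case4 x y t d qe h d' qe' heq ih =>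
    rw [show pvScanB (x :: y :: t) d qe = pvScanB (y :: t) d' qe' from by
      simp [pvScanB, h, heq]]
    rw [ih]
    rw [show plainQ (x :: y :: t) = (if x = '\'' then 1 else 0) + plainQ (y :: t) from by
      simp [plainQ, h]]
    unfold pvStepB at heq
    by_cases h1 : x = '('
    · subst h1
      simp only [if_pos rfl] at heq
      injection heq with hd hq
      subst hd; subst hq
      simp [List.count_cons]
      omega
    · by_cases h2 : x = ')'
      · subst h2
        simp only [if_neg (by decide : ¬ (')' = '(')), if_pos rfl] at heq
        injection heq with hd hq
        subst hd; subst hq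
        simp [List.count_cons]
        omega
      · by_cases h3 : x = '\''
        · subst h3
          simp only [if_neg (by decide : ¬ ('\'' = '(')),
            if_neg (by decide : ¬ ('\'' = ')')), if_pos rfl] at heq
          injection heq with hd hq
          subst hd; subst hq
          simp [List.count_cons]
          rcases Nat.mod_two_eq_zero_or_one (plainQ (y :: t)) with hp | hp <;>
            simp [Nat.add_mod, hp] <;> cases qe <;> simp
        · simp only [if_neg h1, if_neg h2, if_neg h3] at heq
          injection heq with hd hq
          subst hd; subst hq
          simp [List.count_cons, h1, h2, h3, Ne.symm, beq_iff_eq]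

theorem go_single (c : Char) : ∀ (fuel : Nat) (l : List Char) (acc : Nat), l.length ≤ fuel →
    PySem.Chars.count.go [c] fuel l acc = acc + l.count c := by
  intro fuel
  induction fuel with
  | zero =>
    intro l acc h
    have : l = [] := List.eq_nil_of_length_eq_zero (Nat.le_zero.mp h)
    subst this; simp [PySem.Chars.count.go]
  | succ f ih =>
    intro l acc h
    cases l with
    | nil => simp [PySem.Chars.count.go]
    | cons x t =>
      rw [PySem.Chars.count.go]
      simp only [List.length_cons, Nat.succ_le_succ_iff] at h
      by_cases hx : c = x
      · have hp : [c].isPrefixOf (x :: t) = true := by simp [List.isPrefixOf, hx]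
        simp only [hp, if_true, List.length_nil, List.length_cons, List.drop_zero,
          List.drop_succ_cons]
        rw [ih t (acc + 1) h]
        rw [List.count_cons]
        simp only [hx, beq_self_eq_true, if_true]
        omega
      · have hp : [c].isPrefixOf (x :: t) = false := by
          simp only [List.isPrefixOf, Bool.and_true]
          exact beq_eq_false_iff_ne.mpr hx
        simp only [hp, Bool.false_eq_true, if_false]
        rw [ih t acc h]
        rw [List.count_cons]
        simp only [beq_eq_false_iff_ne.mpr (Ne.symm hx), Bool.false_eq_true, if_false,
          Nat.add_zero]

theorem go_esc : ∀ (fuel : Nat) (l : List Char) (acc : Nat), l.length ≤ fuel →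
    PySem.Chars.count.go ['\\', '\''] fuel l acc = acc + escPairs l := by
  intro fuel
  induction fuel with
  | zero =>
    intro l acc h
    have : l = [] := List.eq_nil_of_length_eq_zero (Nat.le_zero.mp h)
    subst this; simp [PySem.Chars.count.go, escPairs]
  | succ f ih =>
    intro l acc h
    cases l with
    | nil => simp [PySem.Chars.count.go, escPairs]
    | cons x t =>
      rw [PySem.Chars.count.go]
      simp only [List.length_cons, Nat.succ_le_succ_iff] at h
      cases t with
      | nil =>
        have hp : ['\\', '\''].isPrefixOf [x] = false := by
          simp [List.isPrefixOf]
        simp only [hp, Bool.false_eq_true, if_false]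
        rw [ih [] acc (by simp)]
        simp [escPairs]
      | cons y t' =>
        by_cases hb : x = '\\' ∧ y = '\''
        · have hp : ['\\', '\''].isPrefixOf (x :: y :: t') = true := by
            simp [List.isPrefixOf, hb.1, hb.2]
          simp only [hp, if_true, List.length_cons, List.length_nil, List.drop_succ_cons,
            List.drop_zero]
          simp only [List.length_cons] at h
          rw [ih t' (acc + 1) (by omega)]
          simp only [escPairs, if_pos hb]
          omega
        · have hp : ['\\', '\''].isPrefixOf (x :: y :: t') = false := by
            simp only [List.isPrefixOf, Bool.and_true,
              Bool.and_eq_false_iff, beq_eq_false_iff_ne]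
            rcases not_and_or.mp hb with hx | hy
            · exact Or.inl (Ne.symm hx)
            · exact Or.inr (Ne.symm hy)
          simp only [hp, Bool.false_eq_true, if_false]
          rw [ih (y :: t') acc (by simpa using h)]
          simp only [escPairs, if_neg hb]

theorem chars_count_single (l : List Char) (c : Char) :
    PySem.Chars.count l [c] = l.count c := by
  rw [PySem.Chars.count]
  simp only [List.isEmpty_cons, Bool.false_eq_true, if_false]
  simpa using go_single c l.length l 0 (le_refl _)

theorem chars_count_esc (l : List Char) :
    PySem.Chars.count l ['\\', '\''] = escPairs l := by
  rw [PySem.Chars.count]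
  simp only [List.isEmpty_cons, Bool.false_eq_true, if_false]
  simpa using go_esc l.length l 0 (le_refl _)

-- ===== VERDICT (by name: the statement is the Claim_ definition above) =====
theorem validate_sql_syntax_spec : Claim_equal_validate_sql_syntax := by
  intro sql_text _
  unfold Spec_validate_sql_syntax validate_sql_syntax validate_sql_syntax_alt
  by_cases hk : (["SELECT", "INSERT", "UPDATE", "DELETE", "CREATE", "DROP", "ALTER", "SHOW",
      "DESCRIBE", "EXPLAIN"] : List String).any
      (fun keyword => PySem.Str.startswith (PySem.Str.strip (PySem.Str.upper sql_text)) keyword)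
  · simp only [hk, Bool.not_true, Bool.false_eq_true, if_false]
    set l := sql_text.toList with hl
    have hc1 : PySem.Str.count sql_text "(" = l.count '(' := by
      rw [PySem.Str.count]; exact chars_count_single l '('
    have hc2 : PySem.Str.count sql_text ")" = l.count ')' := by
      rw [PySem.Str.count]; exact chars_count_single l ')'
    have hc3 : PySem.Str.count sql_text "'" = l.count '\'' := by
      rw [PySem.Str.count]; exact chars_count_single l '\''
    have hc4 : PySem.Str.count sql_text "\\'" = escPairs l := by
      rw [PySem.Str.count]; exact chars_count_esc l
    rw [scanB_spec l 0 true]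
    have hq : (l.count '\'' : Int) - (escPairs l : Int) = (plainQ l : Int) := by
      have := count_quote_split l; omega
    simp only [hc1, hc2, hc3, hc4, hq]
    have hm : PySem.Int.mod (plainQ l : Int) 2 = ((plainQ l % 2 : Nat) : Int) := by
      exact_mod_cast PySem.Int.mod_natCast (plainQ l) 2
    rw [hm]
    by_cases hpar : (l.count '(' : Nat) = l.count ')'
    · have hz : (0 : Int) + (l.count '(' : Int) - (l.count ')' : Int) = 0 := by omega
      simp only [hpar, ne_eq, not_true_eq_false, if_false, hz]
      rcases Nat.mod_two_eq_zero_or_one (plainQ l) with hp | hp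
      · simp [hp]
      · simp [hp]
    · have hnz : (0 : Int) + (l.count '(' : Int) - (l.count ')' : Int) ≠ 0 := by omega
      have hne : (l.count '(' : Nat) ≠ l.count ')' := hpar
      simp only [ne_eq, hne, not_false_eq_true, if_true, hnz, if_false]
  · have hk' : (["SELECT", "INSERT", "UPDATE", "DELETE", "CREATE", "DROP", "ALTER", "SHOW",
      "DESCRIBE", "EXPLAIN"] : List String).any
      (fun keyword => PySem.Str.startswith (PySem.Str.strip (PySem.Str.upper sql_text)) keyword)
      = false := Bool.eq_false_iff.mpr hk
    simp only [hk', Bool.not_false, if_true]
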